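-- pv_equiv track=rewrite | github.com/CodeNova-Ayush/Clausr | server/fingerprint_engine.py | _extract_duty_phrases
-- ===== SOURCE A (Python) =====
-- from typing import Dict, List, Optional, Tuple
--
-- _DUTY_VERBS = ["shall", "must", "responsible for", "obligated to", "agrees to", "will"]
--
-- def _extract_duty_phrases(text: str) -> List[str]:
--     """Extract short phrases around duty verbs for comparison."""
--     low = text.lower()
--     phrases = []
--     for verb in _DUTY_VERBS:
--         idx = low.find(verb)
--         while idx != -1:
--             start = max(0, idx - 30)
--             end = min(len(low), idx + len(verb) + 60)
--             phrases.append(low[start:end].strip())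
--             idx = low.find(verb, idx + 1)
--     return phrases
-- ===== SOURCE B (Python) =====
-- _DUTY_VERBS = ["shall", "must", "responsible for", "obligated to", "agrees to", "will"]
--
-- def _extract_duty_phrases(text: str):
--     """Single left-to-right scan: test every start position once, bucket per verb."""
--     low = text.lower()
--     n = len(low)
--     buckets = [[] for _ in _DUTY_VERBS]
--     for i in range(n):
--         for j, verb in enumerate(_DUTY_VERBS):
--             if low.startswith(verb, i):
--                 start = max(0, i - 30)
--                 end = min(n, i + len(verb) + 60)
--                 buckets[j].append(low[start:end].strip())
--     out = []
--     for b in buckets: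
--         out.extend(b)
--     return out
-- ===== Notes on version B (the rewrite author's own statement) =====
-- stated objective: alternative
-- what changed: Replaced the per-verb find/while rescans with one left-to-right scan over all start positions that buckets matches per verb and concatenates the buckets in verb order.
import Mathlib
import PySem

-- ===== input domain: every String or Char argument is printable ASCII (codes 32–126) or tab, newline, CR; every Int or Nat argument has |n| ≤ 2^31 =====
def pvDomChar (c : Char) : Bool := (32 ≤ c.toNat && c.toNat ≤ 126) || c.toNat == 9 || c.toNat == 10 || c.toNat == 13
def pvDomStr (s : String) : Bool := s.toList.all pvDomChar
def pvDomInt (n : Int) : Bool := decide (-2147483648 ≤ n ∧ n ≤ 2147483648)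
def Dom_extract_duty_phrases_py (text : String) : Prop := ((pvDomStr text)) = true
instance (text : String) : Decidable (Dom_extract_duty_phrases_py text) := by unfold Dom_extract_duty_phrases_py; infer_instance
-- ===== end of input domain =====

-- B replaces A's per-verb find/while rescans by a single left-to-right scan over start
-- positions that buckets matches per verb (alternative decomposition, same exact output).


-- _DUTY_VERBS (shared module constant of both Pythons)
def pvDutyVerbs : List (List Char) :=
  ["shall".toList, "must".toList, "responsible for".toList,
   "obligated to".toList, "agrees to".toList, "will".toList]

-- low[max(0, idx-30) : min(len(low), idx+len(verb)+60)].strip()  — identical expression in A and B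
def pvPhrase (low verb : List Char) (idx : Int) : String :=
  String.ofList (PySem.Chars.strip
    (PySem.List.slice low (some (max 0 (idx - 30)))
      (some (min (PySem.List.len low) (idx + PySem.List.len verb + 60)))))

-- ===== PORT A =====
-- while idx != -1: phrases.append(...); idx = low.find(verb, idx+1)
-- fuel = len(low)+1 bounds the iteration count: each found index is strictly larger
-- than the previous one and < len(low), so the loop runs at most len(low) times.
def pvALoop (low verb : List Char) (idx : Int) (fuel : Nat) (phrases : List String) : List String :=
  match fuel with
  | 0 => phrases
  | fuel + 1 =>
    if idx = -1 then phrases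
    else pvALoop low verb (PySem.Chars.findFrom low verb (idx + 1) none) fuel
           (phrases ++ [pvPhrase low verb idx])

def extract_duty_phrases_py (text : String) : List String :=
  let low := PySem.Chars.lower text.toList
  pvDutyVerbs.foldl
    (fun phrases verb => pvALoop low verb (PySem.Chars.find low verb) (low.length + 1) phrases)
    []

-- ===== PORT B =====
-- inner loop of Source B: for j, verb in enumerate(_DUTY_VERBS): if low.startswith(verb, i): buckets[j].append(...)
-- low.startswith(verb, i) with 0 ≤ i ≤ len(low) is exactly: verb is a prefix of low[i:]
-- buckets[j] for the enumerate index j (0 ≤ j < 6, always in range): .getD j.toNat / .set j.toNat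
def pvBStep (low : List Char) (i : Nat) (bs : List (List String)) : List (List String) :=
  (PySem.List.enumerate pvDutyVerbs).foldl
    (fun bs2 jv =>
      if PySem.Chars.startswith (low.drop i) jv.2 then
        bs2.set jv.1.toNat (bs2.getD jv.1.toNat [] ++ [pvPhrase low jv.2 (i : Int)])
      else bs2)
    bs

def extract_duty_phrases_py_alt (text : String) : List String :=
  let low := PySem.Chars.lower text.toList
  -- for i in range(n): … (range(len(low)): the nonnegative indices 0,…,n-1)
  let buckets := (List.range low.length).foldl (fun bs i => pvBStep low i bs)
    (pvDutyVerbs.map (fun _ => []))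
  -- out = []; for b in buckets: out.extend(b)
  buckets.foldl (fun out b => out ++ b) []

-- ===== PRECONDITION & SPEC =====
def Spec_extract_duty_phrases_py (text : String) (out : List String) : Prop := out = extract_duty_phrases_py_alt text
instance (text : String) (out : List String) : Decidable (Spec_extract_duty_phrases_py text out) := by unfold Spec_extract_duty_phrases_py; infer_instance

-- ===== CLAIM (what is proved, stated in full; the proofs are below) =====
def Claim_equal_extract_duty_phrases_py : Prop := ∀ (text : String), Dom_extract_duty_phrases_py text → Spec_extract_duty_phrases_py text (extract_duty_phrases_py text)

-- ===== LEMMAS AND PROOFS =====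

-- the phrases A's inner while-loop produces for one verb, starting the search at position k
def pvHits (low verb : List Char) (k : Nat) : List String :=
  ((List.range' k (low.length - k)).filter (fun i => PySem.Chars.startswith (low.drop i) verb)).map
    (fun (i : Nat) => pvPhrase low verb (i : Int))

-- B's bucket contents for one verb after scanning positions 0,…,m-1
def pvHitsTo (low verb : List Char) (m : Nat) : List String :=
  ((List.range m).filter (fun i => PySem.Chars.startswith (low.drop i) verb)).map
    (fun (i : Nat) => pvPhrase low verb (i : Int))

-- what one scan position contributes to one verb's bucket
def pvE (low verb : List Char) (i : Nat) : List String :=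
  if PySem.Chars.startswith (low.drop i) verb then [pvPhrase low verb (i : Int)] else []

lemma pvFilter_nil (q : Nat → Bool) (k n : Nat) (h : ∀ i, k ≤ i → i < n → ¬ q i = true) :
    (List.range' k (n - k)).filter q = [] := by
  refine List.filter_eq_nil_iff.mpr (fun x hx => ?_)
  rw [List.mem_range'_1] at hx
  exact h x hx.1 (by omega)

lemma pvFilter_first (q : Nat → Bool) (k m n : Nat) (hkm : k ≤ m) (hmn : m < n) (hq : q m = true)
    (hmin : ∀ i, k ≤ i → i < m → ¬ q i = true) :
    (List.range' k (n - k)).filter q = m :: (List.range' (m + 1) (n - (m + 1))).filter q := by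
  have hsplit : List.range' k (n - k) = List.range' k (m - k) ++ m :: List.range' (m + 1) (n - (m + 1)) := by
    have h1 : List.range' k (m - k) ++ List.range' (k + (m - k)) (n - m) = List.range' k ((m - k) + (n - m)) := by
      simp
    have h2 : List.range' m (n - m) = m :: List.range' (m + 1) (n - (m + 1)) := by
      have : n - m = (n - (m + 1)) + 1 := by omega
      rw [this]; simpa using List.range'_succ (s := m) (n := n - (m + 1)) (step := 1)
    have hk : k + (m - k) = m := by omega
    have hn : (m - k) + (n - m) = n - k := by omega
    rw [hk, h2] at h1; rw [hn] at h1; exact h1.symm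
  rw [hsplit, List.filter_append]
  have hnil : (List.range' k (m - k)).filter q = [] := by
    refine List.filter_eq_nil_iff.mpr (fun x hx => ?_)
    rw [List.mem_range'_1] at hx
    exact hmin x hx.1 (by omega)
  simp [hnil, hq]

-- A's while-loop, started with find(verb, k), produces exactly the phrases at all
-- match positions ≥ k, in ascending order.
lemma pvALoop_eq (low verb : List Char) (hv : verb ≠ []) :
    ∀ (fuel k : Nat) (acc : List String), k ≤ low.length → low.length - k < fuel →
      pvALoop low verb (PySem.Chars.findFrom low verb (k : Int) none) fuel acc
        = acc ++ pvHits low verb k := by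
  intro fuel
  induction fuel with
  | zero => intro k acc hk hf; omega
  | succ f ih =>
    intro k acc hk hf
    by_cases hr : PySem.Chars.findFrom low verb (k : Int) none = -1
    · rw [pvALoop, if_pos hr]
      have hnone : ¬ verb <:+: low.drop k := by
        exact (PySem.Chars.findFrom_natCast_eq_neg_one_iff low verb k hk).mp hr
      have hfil : pvHits low verb k = [] := by
        unfold pvHits
        rw [pvFilter_nil]
        · rfl
        · intro i hki hi hq
          apply hnone
          have hpre : verb <+: low.drop i := (PySem.Chars.startswith_iff (low.drop i) verb).mp hq
          have : verb <+: (low.drop k).drop (i - k) := by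
            rw [List.drop_drop]
            have : k + (i - k) = i := by omega
            rw [this]; exact hpre
          have hIn : PySem.Chars.isIn verb (low.drop k) = true :=
            (PySem.Chars.exists_prefix_drop_iff_isIn verb (low.drop k)).mp ⟨i - k, this⟩
          exact (PySem.Chars.isIn_iff_infix verb (low.drop k)).mp hIn
      rw [hfil, List.append_nil]
    · obtain ⟨hkr, hpre, hmin⟩ := PySem.Chars.findFrom_natCast_spec low verb k hk hr
      set r := PySem.Chars.findFrom low verb (k : Int) none with hrdef
      have hr0 : 0 ≤ r := le_trans (by exact_mod_cast Int.natCast_nonneg k) hkr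
      set m := r.toNat with hmdef
      have hrm : r = (m : Int) := by omega
      have hkm : k ≤ m := by omega
      have hmlen : m < low.length := by
        have h1 : verb.length ≤ (low.drop m).length := hpre.length_le
        have h2 : 0 < verb.length := List.length_pos_iff.mpr hv
        rw [List.length_drop] at h1
        omega
      rw [pvALoop, if_neg hr]
      have hstep : r + 1 = ((m + 1 : Nat) : Int) := by omega
      rw [hstep, ih (m + 1) (acc ++ [pvPhrase low verb r]) (by omega) (by omega)]
      have hq : (fun i => PySem.Chars.startswith (low.drop i) verb) m = true := by
        exact (PySem.Chars.startswith_iff (low.drop m) verb).mpr hpre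
      have hsplit := pvFilter_first (fun i => PySem.Chars.startswith (low.drop i) verb)
        k m low.length hkm hmlen hq
        (fun i hki him hqi => hmin i (by exact_mod_cast Int.ofNat_le.mpr hki)
          (by omega) ((PySem.Chars.startswith_iff (low.drop i) verb).mp hqi))
      unfold pvHits
      rw [hsplit, List.map_cons, hrm, List.append_assoc]
      rfl

-- A's outer for-loop over a list of nonempty verbs
lemma pvAFold_eq (low : List Char) :
    ∀ (verbs : List (List Char)) (acc : List String), (∀ v ∈ verbs, v ≠ []) →
      verbs.foldl (fun acc v => pvALoop low v (PySem.Chars.find low v) (low.length + 1) acc) acc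
        = acc ++ verbs.flatMap (fun v => pvHits low v 0) := by
  intro verbs
  induction verbs with
  | nil => intro acc _; simp
  | cons v vs ih =>
    intro acc hne
    have hv : v ≠ [] := hne v (by simp)
    have hfind : PySem.Chars.find low v = PySem.Chars.findFrom low v ((0 : Nat) : Int) none := by
      simp
    simp only [List.foldl_cons]
    rw [hfind, pvALoop_eq low v hv (low.length + 1) 0 acc (by omega) (by omega),
      ih _ (fun w hw => hne w (by simp [hw]))]
    simp [List.flatMap_cons, List.append_assoc]

-- one step of B's scan, on an explicit six-element bucket list
lemma pvBStep_eq (low : List Char) (i : Nat) (x0 x1 x2 x3 x4 x5 : List String) :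
    pvBStep low i [x0, x1, x2, x3, x4, x5]
      = [x0 ++ pvE low "shall".toList i, x1 ++ pvE low "must".toList i,
         x2 ++ pvE low "responsible for".toList i, x3 ++ pvE low "obligated to".toList i,
         x4 ++ pvE low "agrees to".toList i, x5 ++ pvE low "will".toList i] := by
  simp only [pvBStep, pvDutyVerbs, PySem.List.enumerate_cons, PySem.List.enumerate_nil,
    List.foldl_cons, List.foldl_nil, pvE]
  norm_num
  split_ifs <;> simp [List.set]

lemma pvHitsTo_succ (low verb : List Char) (m : Nat) :
    pvHitsTo low verb (m + 1) = pvHitsTo low verb m ++ pvE low verb m := by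
  unfold pvHitsTo pvE
  rw [List.range_succ, List.filter_append, List.map_append]
  congr 1
  by_cases h : PySem.Chars.startswith (low.drop m) verb <;> simp [h]

-- B's scan invariant: after scanning positions 0,…,m-1 the buckets hold exactly
-- the phrases of the matches seen so far, per verb.
lemma pvBFold_eq (low : List Char) (m : Nat) :
    (List.range m).foldl (fun bs i => pvBStep low i bs) (pvDutyVerbs.map (fun _ => []))
      = [pvHitsTo low "shall".toList m, pvHitsTo low "must".toList m,
         pvHitsTo low "responsible for".toList m, pvHitsTo low "obligated to".toList m,
         pvHitsTo low "agrees to".toList m, pvHitsTo low "will".toList m] := by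
  induction m with
  | zero => simp [pvDutyVerbs, pvHitsTo]
  | succ m ih =>
    rw [List.range_succ, List.foldl_append, ih]
    simp only [List.foldl_cons, List.foldl_nil]
    rw [pvBStep_eq]
    simp [pvHitsTo_succ]

lemma pvHits_eq_pvHitsTo (low verb : List Char) :
    pvHits low verb 0 = pvHitsTo low verb low.length := by
  unfold pvHits pvHitsTo
  rw [List.range_eq_range']
  norm_num

-- ===== VERDICT (by name: the statement is the Claim_ definition above) =====
theorem extract_duty_phrases_py_spec : Claim_equal_extract_duty_phrases_py := by
  intro text _
  have h1 := pvAFold_eq (PySem.Chars.lower text.toList) pvDutyVerbs [] (by decide)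
  have h2 := pvBFold_eq (PySem.Chars.lower text.toList) (PySem.Chars.lower text.toList).length
  simp only [Spec_extract_duty_phrases_py, extract_duty_phrases_py, extract_duty_phrases_py_alt]
  rw [h1, h2]
  simp [pvDutyVerbs, List.flatMap_cons, pvHits_eq_pvHitsTo, List.append_assoc]
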